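-- pv_equiv track=rewrite | github.com/wlgud2757/ProgrammersPractice | week8/flip_string_multiple.py | solution
-- ===== SOURCE A (Python) =====
-- def solution(my_string, queries):
--     result = my_string
--     for query in queries:
--         temp = list(result[query[0]:query[1]+1])
--         temp.reverse()
--         temp = "".join(temp)
--         result = list(result)
--         result[query[0]:query[1]+1] = temp
--         result = "".join(result)
--     return result
-- ===== SOURCE B (Python) =====
-- def solution(my_string, queries):
--     # Keep one char list for the whole run; for each query reverse the
--     # window s[q0:q1+1] in place with two pointers.
--     chars = list(my_string)
--     n = len(chars)
--     for q in queries: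
--         i, j, _ = slice(q[0], q[1] + 1).indices(n)
--         j -= 1
--         while i < j:
--             chars[i], chars[j] = chars[j], chars[i]
--             i += 1
--             j -= 1
--     return "".join(chars)
-- ===== Notes on version B (the rewrite author's own statement) =====
-- stated objective: faster
-- what changed: B keeps one char list for the whole run and reverses each query window in place with two pointers (window bounds via the stdlib slice(...).indices), instead of A's per-query string slicing, list conversion, reversed-slice splice and join; Pre_ excludes queries with fewer than two elements, on which A raises IndexError.
import Mathlib
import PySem

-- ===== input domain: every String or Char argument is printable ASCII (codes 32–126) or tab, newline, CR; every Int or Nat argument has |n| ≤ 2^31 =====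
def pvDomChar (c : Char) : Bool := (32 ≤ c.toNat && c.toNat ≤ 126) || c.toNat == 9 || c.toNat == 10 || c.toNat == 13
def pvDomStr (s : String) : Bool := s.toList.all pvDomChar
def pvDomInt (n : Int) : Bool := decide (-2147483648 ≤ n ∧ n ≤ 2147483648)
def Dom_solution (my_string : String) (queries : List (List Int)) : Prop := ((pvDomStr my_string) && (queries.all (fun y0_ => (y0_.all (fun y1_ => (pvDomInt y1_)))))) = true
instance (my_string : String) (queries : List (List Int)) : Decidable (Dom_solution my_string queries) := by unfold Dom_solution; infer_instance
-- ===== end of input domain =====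

-- B keeps one char list and reverses each query window in place with two pointers;
-- A splices a reversed slice back into a rebuilt string per query.

-- ===== PORT A =====
-- per query: temp = list(result[q0:q1+1]); temp.reverse(); result = list(result);
-- result[q0:q1+1] = temp; result = "".join(result)
-- The slice assignment l[a:b] = t is ported by hand (exact Python splice semantics
-- for any ints a, b): l[:a'] + t + l[max(a',b'):] with a', b' the clamped bounds.
def solution (my_string : String) (queries : List (List Int)) : String :=
  queries.foldl (fun result query =>
    let q0 := PySem.List.pyGetD query 0 0
    let q1 := PySem.List.pyGetD query 1 0
    let rl := result.toList
    let temp := (PySem.List.slice rl (some q0) (some (q1 + 1))).reverse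
    let a := PySem.List.clampIdx rl.length q0
    let b := PySem.List.clampIdx rl.length (q1 + 1)
    String.ofList (rl.take a ++ temp ++ rl.drop (max a b))) my_string

-- ===== PORT B =====
-- the while loop: chars[i], chars[j] = chars[j], chars[i]; i += 1; j -= 1
-- (structural recursion on a fuel bound; the fuel only makes the loop total,
-- it never changes the computation: when it reaches 0, i < j already fails)
def swapGo : Nat → List Char → Int → Int → List Char
  | fuel + 1, chars, i, j =>
      if i < j then
        let ci := PySem.List.pyGetD chars i ' '
        let cj := PySem.List.pyGetD chars j ' '
        swapGo fuel (PySem.List.pySetD (PySem.List.pySetD chars i cj) j ci) (i + 1) (j - 1)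
      else chars
  | 0, chars, _, _ => chars

def swapLoop (chars : List Char) (i j : Int) : List Char :=
  swapGo (j - i).toNat chars i j

-- slice(q0, q1+1).indices(n) is the stdlib call; its start/stop are exactly
-- PySem.List.clampIdx n q0 and clampIdx n (q1+1).
def solution_alt (my_string : String) (queries : List (List Int)) : String :=
  String.ofList (queries.foldl (fun chars q =>
    let n := chars.length
    let i := PySem.List.clampIdx n (PySem.List.pyGetD q 0 0)
    let j := PySem.List.clampIdx n (PySem.List.pyGetD q 1 0 + 1)
    swapLoop chars (i : Int) ((j : Int) - 1)) my_string.toList)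

-- ===== PRECONDITION & SPEC =====
-- A raises IndexError (query[1]) when some query has fewer than two elements.
def Pre_solution (my_string : String) (queries : List (List Int)) : Prop :=
  ∀ q ∈ queries, 2 ≤ q.length
instance (my_string : String) (queries : List (List Int)) : Decidable (Pre_solution my_string queries) := by unfold Pre_solution; infer_instance
def pvWitness_solution : String × List (List Int) := ("abcde", [[0, 2], [1, 3]])

def Spec_solution (my_string : String) (queries : List (List Int)) (out : String) : Prop := out = solution_alt my_string queries
instance (my_string : String) (queries : List (List Int)) (out : String) : Decidable (Spec_solution my_string queries out) := by unfold Spec_solution; infer_instance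

-- ===== CLAIM (what is proved, stated in full; the proofs are below) =====
def Claim_equal_solution : Prop := ∀ (my_string : String) (queries : List (List Int)), Dom_solution my_string queries → Pre_solution my_string queries → Spec_solution my_string queries (solution my_string queries)

-- ===== LEMMAS AND PROOFS =====

-- Elementwise characterization of the two-pointer swap loop (by fuel).
lemma swapGo_elem : ∀ (fuel : Nat) (l : List Char) (i jp1 : Nat), jp1 ≤ l.length →
    jp1 ≤ i + fuel + 1 →
    ∀ k : Nat, (swapGo fuel l (i : Int) ((jp1 : Int) - 1))[k]?
      = if i ≤ k ∧ k < jp1 then l[i + jp1 - 1 - k]? else l[k]? := by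
  intro fuel
  induction fuel with
  | zero =>
      intro l i jp1 hlen hn k
      simp only [swapGo]
      by_cases hk : i ≤ k ∧ k < jp1
      · rw [if_pos hk]
        congr 1
        omega
      · rw [if_neg hk]
  | succ n ih =>
      intro l i jp1 hlen hn k
      by_cases hij : i + 1 < jp1
      · have h1 : 1 ≤ jp1 := by omega
        have hi : i < l.length := by omega
        have hj : jp1 - 1 < l.length := by omega
        rw [swapGo, if_pos (by omega : (i : Int) < (jp1 : Int) - 1)]
        simp only
        have hc : (jp1 : Int) - 1 = ((jp1 - 1 : Nat) : Int) := by omega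
        rw [hc]
        rw [PySem.List.pyGetD_natCast, PySem.List.pyGetD_natCast,
            PySem.List.pySetD_natCast, PySem.List.pySetD_natCast]
        have hc2 : (i : Int) + 1 = ((i + 1 : Nat) : Int) := by omega
        rw [hc2]
        have hlen' : ((l.set i (l.getD (jp1 - 1) ' ')).set (jp1 - 1) (l.getD i ' ')).length = l.length := by
          simp
        rw [ih _ (i + 1) (jp1 - 1) (by rw [hlen']; omega) (by omega)]
        rw [List.getD_eq_getElem l ' ' hi, List.getD_eq_getElem l ' ' hj]
        by_cases hk1 : k = i
        · subst hk1
          rw [if_neg (by omega), if_pos (by omega)]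
          rw [List.getElem?_set, List.getElem?_set]
          rw [if_neg (by omega), if_pos rfl, if_pos (by simpa using hi)]
          rw [List.getElem?_eq_getElem (by omega : k + jp1 - 1 - k < l.length)]
          congr 1
          congr 1
          omega
        · by_cases hk2 : k = jp1 - 1
          · subst hk2
            rw [if_neg (by omega), if_pos (by omega)]
            rw [List.getElem?_set]
            rw [if_pos rfl, if_pos (by simpa using hj)]
            rw [List.getElem?_eq_getElem (by omega : i + jp1 - 1 - (jp1 - 1) < l.length)]
            congr 1
            congr 1
            omega
          · by_cases hk3 : i + 1 ≤ k ∧ k < jp1 - 1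
            · rw [if_pos hk3, if_pos (by omega)]
              rw [List.getElem?_set, List.getElem?_set]
              rw [if_neg (by omega), if_neg (by omega)]
              congr 1
              omega
            · rw [if_neg hk3, if_neg (by omega)]
              rw [List.getElem?_set, List.getElem?_set]
              rw [if_neg (by omega), if_neg (by omega)]
      · rw [swapGo, if_neg (by omega : ¬((i : Int) < (jp1 : Int) - 1))]
        by_cases hk : i ≤ k ∧ k < jp1
        · rw [if_pos hk]
          congr 1
          omega
        · rw [if_neg hk]

lemma swap_elem (l : List Char) (i jp1 : Nat) (hlen : jp1 ≤ l.length) (k : Nat) :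
    (swapLoop l (i : Int) ((jp1 : Int) - 1))[k]?
      = if i ≤ k ∧ k < jp1 then l[i + jp1 - 1 - k]? else l[k]? := by
  unfold swapLoop
  exact swapGo_elem ((jp1 : Int) - 1 - (i : Int)).toNat l i jp1 hlen (by omega) k

-- The index-map form of splice-with-reversed-middle.
lemma map_mirror (l : List Char) (A B : Nat) (hA : A ≤ l.length) (hB : B ≤ l.length) :
    (List.range l.length).map (fun (k : Nat) =>
      if (A : Int) ≤ (k : Int) ∧ (k : Int) < (B : Int) then
        PySem.List.pyGetD l ((A : Int) + (B : Int) - 1 - (k : Int)) ' '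
      else PySem.List.pyGetD l (k : Int) ' ')
    = l.take A ++ ((l.drop A).take (B - A)).reverse ++ l.drop (max A B) := by
  apply List.ext_getElem
  · simp; omega
  · intro k hk hk'
    simp only [List.length_map, List.length_range] at hk
    simp only [List.getElem_map, List.getElem_range]
    by_cases h1 : (A : Int) ≤ (k : Int) ∧ (k : Int) < (B : Int)
    · rw [if_pos h1]
      have hAB : A ≤ k ∧ k < B := by exact ⟨by exact_mod_cast h1.1, by exact_mod_cast h1.2⟩
      have hidx : (A : Int) + (B : Int) - 1 - (k : Int) = ((A + B - 1 - k : Nat) : Int) := by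
        omega
      rw [hidx, PySem.List.pyGetD_natCast,
          List.getD_eq_getElem l ' ' (by omega : A + B - 1 - k < l.length)]
      rw [List.getElem_append_left (by simp; omega), List.getElem_append_right (by simp; omega)]
      simp only [List.getElem_reverse, List.getElem_take, List.getElem_drop, List.length_take,
        List.length_drop]
      congr 1
      omega
    · rw [if_neg h1]
      rw [PySem.List.pyGetD_natCast, List.getD_eq_getElem l ' ' (by omega : k < l.length)]
      by_cases h2 : k < A
      · rw [List.getElem_append_left (by simp; omega), List.getElem_append_left (by simp; omega)]
        simp
      · have hk2 : max A B ≤ k := by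
          rcases Nat.le_total A B with h | h <;> omega
        rw [List.getElem_append_right (by simp; omega)]
        simp only [List.length_append, List.length_take, List.length_reverse, List.length_drop,
          List.getElem_drop]
        congr 1
        omega

-- Splice-with-reversed-middle equals the two-pointer loop.
lemma splice_eq_swap (l : List Char) (A B : Nat) (hA : A ≤ l.length) (hB : B ≤ l.length) :
    l.take A ++ ((l.drop A).take (B - A)).reverse ++ l.drop (max A B)
    = swapLoop l (A : Int) ((B : Int) - 1) := by
  rw [← map_mirror l A B hA hB]
  apply List.ext_getElem?
  intro k
  rw [swap_elem l A B hB k]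
  by_cases hk : k < l.length
  · rw [List.getElem?_map, List.getElem?_range hk]
    simp only [Option.map_some]
    by_cases h1 : A ≤ k ∧ k < B
    · rw [if_pos (by exact ⟨by exact_mod_cast h1.1, by exact_mod_cast h1.2⟩ :
            (A : Int) ≤ (k : Int) ∧ (k : Int) < (B : Int)), if_pos h1]
      have hidx : (A : Int) + (B : Int) - 1 - (k : Int) = ((A + B - 1 - k : Nat) : Int) := by
        omega
      rw [hidx, PySem.List.pyGetD_natCast,
          List.getD_eq_getElem l ' ' (by omega : A + B - 1 - k < l.length),
          List.getElem?_eq_getElem (by omega : A + B - 1 - k < l.length)]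
    · rw [if_neg (by exact fun h => h1 ⟨by exact_mod_cast h.1, by exact_mod_cast h.2⟩), if_neg h1]
      rw [PySem.List.pyGetD_natCast, List.getD_eq_getElem l ' ' hk,
          List.getElem?_eq_getElem hk]
  · rw [if_neg (by omega)]
    rw [List.getElem?_eq_none (by simp only [List.length_map, List.length_range]; omega),
        List.getElem?_eq_none (by omega)]

-- One query applied to the same char list gives the same char list.
lemma step_eq (l : List Char) (q : List Int) :
    (let q0 := PySem.List.pyGetD q 0 0
     let q1 := PySem.List.pyGetD q 1 0
     let temp := (PySem.List.slice l (some q0) (some (q1 + 1))).reverse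
     let a := PySem.List.clampIdx l.length q0
     let b := PySem.List.clampIdx l.length (q1 + 1)
     l.take a ++ temp ++ l.drop (max a b))
    = swapLoop l ((PySem.List.clampIdx l.length (PySem.List.pyGetD q 0 0) : Nat) : Int)
        (((PySem.List.clampIdx l.length (PySem.List.pyGetD q 1 0 + 1) : Nat) : Int) - 1) := by
  simp only
  rw [← splice_eq_swap l (PySem.List.clampIdx l.length (PySem.List.pyGetD q 0 0))
        (PySem.List.clampIdx l.length (PySem.List.pyGetD q 1 0 + 1))
        (PySem.List.clampIdx_le _ _) (PySem.List.clampIdx_le _ _)]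
  simp only [PySem.List.slice]

lemma fold_eq (queries : List (List Int)) (s : String) :
    queries.foldl (fun result query =>
      let q0 := PySem.List.pyGetD query 0 0
      let q1 := PySem.List.pyGetD query 1 0
      let rl := result.toList
      let temp := (PySem.List.slice rl (some q0) (some (q1 + 1))).reverse
      let a := PySem.List.clampIdx rl.length q0
      let b := PySem.List.clampIdx rl.length (q1 + 1)
      String.ofList (rl.take a ++ temp ++ rl.drop (max a b))) s
    = String.ofList (queries.foldl (fun chars q =>
        let n := chars.length
        let i := PySem.List.clampIdx n (PySem.List.pyGetD q 0 0)
        let j := PySem.List.clampIdx n (PySem.List.pyGetD q 1 0 + 1)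
        swapLoop chars (i : Int) ((j : Int) - 1)) s.toList) := by
  induction queries generalizing s with
  | nil => simp
  | cons q qs ih =>
      simp only [List.foldl_cons]
      rw [ih]
      congr 2
      simp only [String.toList_ofList]
      exact step_eq s.toList q

-- ===== VERDICT (by name: the statement is the Claim_ definition above) =====
theorem solution_spec : Claim_equal_solution := by
  intro my_string queries _ _
  unfold Spec_solution solution solution_alt
  exact fold_eq queries my_string
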